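-- pv_equiv track=rewrite | github.com/alchemist-clover/pyProjectEuler | P361.py | getStartFlags
-- ===== SOURCE A (Python) =====
-- def getStartFlags(bits):
--     startEven = startOdd = True
--     for i in range(1, len(bits), 2):
--         if bits[i] == bits[i - 1]:
--             startEven = False
--             break
--     for i in range(2, len(bits), 2):
--         if bits[i] == bits[i - 1]:
--             startOdd = False
--             break
--     return startEven, startOdd
-- ===== SOURCE B (Python) =====
-- def getStartFlags(bits):
--     startEven = startOdd = True
--     for i in range(1, len(bits)):
--         if bits[i] == bits[i - 1]:
--             if i % 2 == 1:
--                 startEven = False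
--             else:
--                 startOdd = False
--     return startEven, startOdd
-- ===== Notes on version B (the rewrite author's own statement) =====
-- stated objective: simpler
-- what changed: Replaces A's two strided half-scans (each with an early break) by one full pass over all adjacent pairs that clears startEven or startOdd depending on the parity of the index.
import Mathlib
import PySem

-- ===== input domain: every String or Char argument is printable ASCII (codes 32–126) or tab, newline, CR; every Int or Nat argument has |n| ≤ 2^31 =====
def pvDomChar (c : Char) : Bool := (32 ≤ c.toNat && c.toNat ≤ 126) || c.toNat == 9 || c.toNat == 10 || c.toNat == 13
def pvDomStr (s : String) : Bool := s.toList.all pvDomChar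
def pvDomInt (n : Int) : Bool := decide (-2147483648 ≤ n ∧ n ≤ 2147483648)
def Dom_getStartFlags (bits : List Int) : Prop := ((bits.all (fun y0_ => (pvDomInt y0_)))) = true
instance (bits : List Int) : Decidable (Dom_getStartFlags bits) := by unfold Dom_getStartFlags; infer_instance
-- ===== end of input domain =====

-- B replaces A's two strided half-scans (with early breaks) by a single pass over all
-- adjacent pairs, branching on index parity (objective: simpler).

-- ===== PORT A =====
-- one strided loop of A: walks the index list, breaks (returns false) at the first equal pair
def pvFindA (bits : List Int) : List Int → Bool
  | [] => true
  | i :: rest =>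
      if PySem.List.pyGetD bits i 0 = PySem.List.pyGetD bits (i - 1) 0 then false
      else pvFindA bits rest

def getStartFlags (bits : List Int) : Bool × Bool :=
  let startEven := pvFindA bits (PySem.List.pyRange 1 (PySem.List.len bits) 2)
  let startOdd := pvFindA bits (PySem.List.pyRange 2 (PySem.List.len bits) 2)
  (startEven, startOdd)

-- ===== PORT B =====
-- B's single loop: both flags carried through one full scan, cleared by parity of i
def pvScanB (bits : List Int) (idxs : List Int) (se so : Bool) : Bool × Bool :=
  match idxs with
  | [] => (se, so)
  | i :: rest =>
      if PySem.List.pyGetD bits i 0 = PySem.List.pyGetD bits (i - 1) 0 then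
        if PySem.Int.mod i 2 = 1 then pvScanB bits rest false so
        else pvScanB bits rest se false
      else pvScanB bits rest se so

def getStartFlags_alt (bits : List Int) : Bool × Bool :=
  pvScanB bits (PySem.List.pyRange 1 (PySem.List.len bits) 1) true true

-- ===== PRECONDITION & SPEC =====
def Spec_getStartFlags (bits : List Int) (out : Bool × Bool) : Prop := out = getStartFlags_alt bits
instance (bits : List Int) (out : Bool × Bool) : Decidable (Spec_getStartFlags bits out) := by unfold Spec_getStartFlags; infer_instance

-- ===== CLAIM (what is proved, stated in full; the proofs are below) =====
def Claim_equal_getStartFlags : Prop := ∀ (bits : List Int), Dom_getStartFlags bits → Spec_getStartFlags bits (getStartFlags bits)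

-- ===== LEMMAS AND PROOFS =====

def pvEq (bits : List Int) (i : Int) : Bool :=
  decide (PySem.List.pyGetD bits i 0 = PySem.List.pyGetD bits (i - 1) 0)

theorem pvFindA_eq_any (bits : List Int) (l : List Int) :
    pvFindA bits l = !(l.any (pvEq bits)) := by
  induction l with
  | nil => rfl
  | cons i rest ih =>
      by_cases h : PySem.List.pyGetD bits i 0 = PySem.List.pyGetD bits (i - 1) 0 <;>
        simp [pvFindA, pvEq, h, ih]

theorem pvScanB_eq_any (bits : List Int) (l : List Int) (se so : Bool) :
    pvScanB bits l se so =
      (se && !(l.any (fun i => pvEq bits i && decide (PySem.Int.mod i 2 = 1))),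
       so && !(l.any (fun i => pvEq bits i && !decide (PySem.Int.mod i 2 = 1)))) := by
  induction l generalizing se so with
  | nil => simp [pvScanB]
  | cons i rest ih =>
      by_cases h : PySem.List.pyGetD bits i 0 = PySem.List.pyGetD bits (i - 1) 0
      · simp only [pvScanB, if_pos h, ih]
        by_cases hm : (i % 2 : Int) = 1 <;>
          simp [pvEq, h, hm]
      · simp [pvScanB, pvEq, h, ih]

theorem any_odd (bits : List Int) (n : Int) :
    (PySem.List.pyRange 1 n 2).any (pvEq bits) =
      (PySem.List.pyRange 1 n 1).any (fun i => pvEq bits i && decide (PySem.Int.mod i 2 = 1)) := by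
  apply Bool.eq_iff_iff.mpr
  simp only [List.any_eq_true, PySem.List.mem_pyRange_iff_of_pos (by norm_num : (0:Int) < 2),
    PySem.List.mem_pyRange_one, Bool.and_eq_true, decide_eq_true_eq,
    PySem.Int.mod_eq_emod_of_pos (by norm_num : (0:Int) < 2)]
  constructor
  · rintro ⟨i, ⟨h1, h2, h3⟩, hp⟩
    exact ⟨i, ⟨h1, h2⟩, hp, by omega⟩
  · rintro ⟨i, ⟨h1, h2⟩, hp, hm⟩
    exact ⟨i, ⟨h1, h2, by omega⟩, hp⟩

theorem any_even (bits : List Int) (n : Int) :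
    (PySem.List.pyRange 2 n 2).any (pvEq bits) =
      (PySem.List.pyRange 1 n 1).any (fun i => pvEq bits i && !decide (PySem.Int.mod i 2 = 1)) := by
  apply Bool.eq_iff_iff.mpr
  simp only [List.any_eq_true, PySem.List.mem_pyRange_iff_of_pos (by norm_num : (0:Int) < 2),
    PySem.List.mem_pyRange_one, Bool.and_eq_true, Bool.not_eq_true', decide_eq_false_iff_not,
    PySem.Int.mod_eq_emod_of_pos (by norm_num : (0:Int) < 2)]
  constructor
  · rintro ⟨i, ⟨h1, h2, h3⟩, hp⟩
    exact ⟨i, ⟨by omega, h2⟩, hp, by omega⟩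
  · rintro ⟨i, ⟨h1, h2⟩, hp, hm⟩
    exact ⟨i, ⟨by omega, h2, by omega⟩, hp⟩

-- ===== VERDICT (by name: the statement is the Claim_ definition above) =====
theorem getStartFlags_spec : Claim_equal_getStartFlags := by
  intro bits _
  unfold Spec_getStartFlags getStartFlags getStartFlags_alt
  rw [pvScanB_eq_any, pvFindA_eq_any, pvFindA_eq_any, any_odd, any_even]
  simp
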